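-- pv_equiv track=rewrite | github.com/calfzhou/gocalf.com | source/coding/2017-grid-game/solution.py | gridGame
-- ===== SOURCE A (Python) =====
-- def gridGame(grid: list[list[int]]) -> int:
--     min2 = lambda a, b: a if a <= b else b
--     max2 = lambda a, b: a if a >= b else b
--     row_0_point = sum(grid[0]) - grid[0][0]
--     row_1_point = 0
--     min_robot2_point = row_0_point
--     for i in range(1, len(grid[0])):
--         row_0_point -= grid[0][i]
--         row_1_point += grid[1][i-1]
--         min_robot2_point = min2(min_robot2_point, max2(row_0_point, row_1_point))
--
--     return min_robot2_point
-- ===== SOURCE B (Python) =====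
-- def gridGame(grid: list[list[int]]) -> int:
--     top = grid[0]
--     n = len(top)
--
--     def solve(lo: int, hi: int, add_top: int, add_bot: int) -> int:
--         # minimum, over drop columns j in [lo, hi), of robot 2's best leftover:
--         # add_top carries top points strictly right of this block,
--         # add_bot carries bottom points strictly left of it.
--         if hi - lo <= 1:
--             return max(add_top, add_bot)
--         mid = (lo + hi) // 2
--         left = solve(lo, mid, add_top + sum(top[mid:hi]), add_bot)
--         right = solve(mid, hi, add_top, add_bot + sum(grid[1][lo:mid]))
--         return min(left, right)
--
--     first = sum(top[1:])  # dropping at column 0 leaves robot 2 the rest of the top row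
--     if n <= 1:
--         return first
--     return min(first, solve(1, n, 0, grid[1][0]))
-- ===== Notes on version B (the rewrite author's own statement) =====
-- stated objective: alternative
-- what changed: Replaces A's single left-to-right loop with three running scalars by a divide-and-conquer recursion over column intervals: drop-at-column-0 is handled directly, and for the remaining columns solve(lo,hi) splits the interval at its midpoint, pushing the right half's top sum into the left call and the left half's bottom sum into the right call, taking min of the two halves; a leaf returns max(add_top, add_bot).
import Mathlib
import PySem

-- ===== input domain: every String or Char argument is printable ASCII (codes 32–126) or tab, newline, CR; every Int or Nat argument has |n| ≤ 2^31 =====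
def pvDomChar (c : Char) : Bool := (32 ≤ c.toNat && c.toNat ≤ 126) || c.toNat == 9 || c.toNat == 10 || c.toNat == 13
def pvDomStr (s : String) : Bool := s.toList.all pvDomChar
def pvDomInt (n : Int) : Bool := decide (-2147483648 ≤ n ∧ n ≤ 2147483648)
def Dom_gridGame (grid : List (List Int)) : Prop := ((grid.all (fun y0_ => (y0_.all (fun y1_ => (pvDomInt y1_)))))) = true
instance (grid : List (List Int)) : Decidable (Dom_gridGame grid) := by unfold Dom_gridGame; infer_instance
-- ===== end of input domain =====

-- B replaces A's single fused left-to-right loop by a divide-and-conquer recursion over column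
-- intervals (column 0 handled directly); same exact result, different decomposition. No side effects.

-- ===== PORT A =====
-- A's local lambdas min2/max2
def pvMin2 (a b : Int) : Int := if a ≤ b then a else b
def pvMax2 (a b : Int) : Int := if a ≥ b then a else b

def gridGame (grid : List (List Int)) : Int :=
  let row0 := PySem.List.pyGetD grid 0 []
  let row1 := PySem.List.pyGetD grid 1 []
  let r0 : Int := row0.sum - PySem.List.pyGetD row0 0 0
  let st :=
    (PySem.List.pyRange 1 (row0.length : Int) 1).foldl
      (fun (s : Int × Int × Int) i =>
        let r0' := s.1 - PySem.List.pyGetD row0 i 0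
        let r1' := s.2.1 + PySem.List.pyGetD row1 (i - 1) 0
        (r0', r1', pvMin2 s.2.2 (pvMax2 r0' r1')))
      (r0, 0, r0)
  st.2.2

-- ===== PORT B =====
-- midpoint bounds used only by pvSolve's termination argument
theorem pvSolveDec (lo hi : Int) (h : ¬ hi - lo ≤ 1) :
    (PySem.Int.floordiv (lo + hi) 2 - lo).toNat < (hi - lo).toNat ∧
      (hi - PySem.Int.floordiv (lo + hi) 2).toNat < (hi - lo).toNat := by
  have hm := PySem.Int.floordiv_two_mid_bounds (lo := lo + 1) (hi := hi - 1) (by omega)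
  have e : lo + 1 + (hi - 1) = lo + hi := by ring
  rw [e] at hm
  omega

-- the inner recursive function solve(lo, hi, add_top, add_bot) of Source B
def pvSolve (top bot : List Int) (lo hi addTop addBot : Int) : Int :=
  if _h : hi - lo ≤ 1 then max addTop addBot
  else
    let mid := PySem.Int.floordiv (lo + hi) 2
    min
      (pvSolve top bot lo mid (addTop + (PySem.List.slice top (some mid) (some hi)).sum) addBot)
      (pvSolve top bot mid hi addTop (addBot + (PySem.List.slice bot (some lo) (some mid)).sum))
termination_by (hi - lo).toNat
decreasing_by
  · exact (pvSolveDec lo hi _h).1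
  · exact (pvSolveDec lo hi _h).2

def gridGame_alt (grid : List (List Int)) : Int :=
  let top := PySem.List.pyGetD grid 0 []
  let n : Int := (top.length : Int)
  let first := (PySem.List.slice top (some 1) none).sum
  if n ≤ 1 then first
  else
    min first
      (pvSolve top (PySem.List.pyGetD grid 1 []) 1 n 0
        (PySem.List.pyGetD (PySem.List.pyGetD grid 1 []) 0 0))

-- ===== PRECONDITION & SPEC =====
-- Pre_ excludes exactly the inputs on which the Python A raises IndexError:
-- an empty grid, an empty first row, or (when the first row has ≥ 2 columns)
-- a missing or too-short second row.
def Pre_gridGame (grid : List (List Int)) : Prop :=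
  grid ≠ [] ∧ grid.headD [] ≠ [] ∧
    (2 ≤ (grid.headD []).length →
      2 ≤ grid.length ∧ (grid.headD []).length ≤ (grid.getD 1 []).length + 1)
instance (grid : List (List Int)) : Decidable (Pre_gridGame grid) := by
  unfold Pre_gridGame; infer_instance
def pvWitness_gridGame : List (List Int) := [[2, 5, 4], [1, 5, 1]]

def Spec_gridGame (grid : List (List Int)) (out : Int) : Prop := out = gridGame_alt grid
instance (grid : List (List Int)) (out : Int) : Decidable (Spec_gridGame grid out) := by unfold Spec_gridGame; infer_instance

-- ===== CLAIM (what is proved, stated in full; the proofs are below) =====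
def Claim_equal_gridGame : Prop := ∀ (grid : List (List Int)), Dom_gridGame grid → Pre_gridGame grid → Spec_gridGame grid (gridGame grid)

-- ===== LEMMAS AND PROOFS =====

-- Python's min2/max2 lambdas are Int min/max
theorem pvMin2_eq_min (a b : Int) : pvMin2 a b = min a b := by
  simp [pvMin2, min_def]

theorem pvMax2_eq_max (a b : Int) : pvMax2 a b = max a b := by
  simp only [pvMax2, max_def]
  split_ifs <;> omega

-- sum of the column segment [a, c) of a row (clamped like a Python slice)
def segSum (l : List Int) (a c : Nat) : Int := ((l.drop a).take (c - a)).sum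

theorem segSum_add (l : List Int) (a b c : Nat) (hab : a ≤ b) (hbc : b ≤ c) :
    segSum l a c = segSum l a b + segSum l b c := by
  unfold segSum
  have hc : c - a = (b - a) + (c - b) := by omega
  rw [hc, List.take_add, List.sum_append, List.drop_drop,
    show a + (b - a) = b from by omega]

theorem foldl_min_comm (l : List Int) : ∀ a x : Int,
    min a (l.foldl min x) = l.foldl min (min a x) := by
  induction l with
  | nil => intro a x; simp
  | cons y tl ih =>
      intro a x
      simp only [List.foldl_cons]
      rw [ih, min_assoc]

-- candidate value for drop column j: carried constants plus segment sums
def pvCand (t b : List Int) (hi lo : Nat) (aT aB : Int) (j : Nat) : Int :=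
  max (aT + segSum t (j + 1) hi) (aB + segSum b lo j)

-- characterization of B's divide-and-conquer: min over the candidates of the interval
theorem solve_char (t b : List Int) : ∀ (k lo hi : Nat) (aT aB : Int),
    lo < hi → hi - lo = k →
    pvSolve t b (lo : Int) (hi : Int) aT aB =
      ((List.range (k - 1)).map (fun d => pvCand t b hi lo aT aB (lo + 1 + d))).foldl min
        (pvCand t b hi lo aT aB lo) := by
  intro k
  induction k using Nat.strong_induction_on with
  | _ k ih =>
      intro lo hi aT aB hlt hk
      rcases Nat.lt_or_ge k 2 with hk2 | hk2
      · -- k = 1 : leaf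
        have hk1 : k = 1 := by omega
        have hhi : hi = lo + 1 := by omega
        subst hk1 hhi
        rw [pvSolve]
        have hle : (↑(lo + 1) : Int) - ↑lo ≤ 1 := by omega
        rw [dif_pos hle]
        simp [pvCand, segSum]
      · -- k ≥ 2 : split
        rw [pvSolve]
        have hle : ¬ ((hi : Int) - (lo : Int) ≤ 1) := by omega
        rw [dif_neg hle]
        have ecast : (lo : Int) + (hi : Int) = ((lo + hi : Nat) : Int) := by push_cast; ring
        have hmid : PySem.Int.floordiv ((lo : Int) + (hi : Int)) 2 = (((lo + hi) / 2 : Nat) : Int) := by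
          rw [ecast]; exact_mod_cast PySem.Int.floordiv_natCast (lo + hi) 2
        set m : Nat := (lo + hi) / 2 with hm
        have hlom : lo + 1 ≤ m := by omega
        have hmhi : m ≤ hi - 1 := by omega
        simp only [hmid]
        rw [PySem.List.slice_natCast, PySem.List.slice_natCast]
        have kL : Nat := m - lo
        have hL := ih (m - lo) (by omega) lo m (aT + segSum t m hi) aB (by omega) rfl
        have hR := ih (hi - m) (by omega) m hi aT (aB + segSum b lo m) (by omega) rfl
        rw [show ((t.drop m).take (hi - m)).sum = segSum t m hi from rfl,
            show ((b.drop lo).take (m - lo)).sum = segSum b lo m from rfl, hL, hR]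
        -- rewrite the shifted candidates into the global ones
        have cL : ∀ j : Nat, j < m →
            pvCand t b m lo (aT + segSum t m hi) aB j = pvCand t b hi lo aT aB j := by
          intro j hj
          unfold pvCand
          rw [segSum_add t (j + 1) m hi (by omega) (by omega)]
          ring_nf
        have cR : ∀ j : Nat, m ≤ j →
            pvCand t b hi m aT (aB + segSum b lo m) j = pvCand t b hi lo aT aB j := by
          intro j hj
          unfold pvCand
          rw [segSum_add b lo m j (by omega) hj]
          ring_nf
        set g := pvCand t b hi lo aT aB with hg
        rw [cL lo (by omega), cR m (le_refl m)]
        have mapL : (List.range (m - lo - 1)).map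
              (fun d => pvCand t b m lo (aT + segSum t m hi) aB (lo + 1 + d))
            = (List.range (m - lo - 1)).map (fun d => g (lo + 1 + d)) := by
          refine List.map_congr_left (fun d hd => ?_)
          rw [List.mem_range] at hd
          exact cL _ (by omega)
        have mapR : (List.range (hi - m - 1)).map
              (fun d => pvCand t b hi m aT (aB + segSum b lo m) (m + 1 + d))
            = (List.range (hi - m - 1)).map (fun d => g (m + 1 + d)) := by
          refine List.map_congr_left (fun d hd => ?_)
          rw [List.mem_range] at hd
          exact cR _ (by omega)
        rw [mapL, mapR]
        -- combine the two folds into one fold over the concatenated candidate list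
        rw [foldl_min_comm]
        have hsplit : (List.range (k - 1)).map (fun d => g (lo + 1 + d))
            = (((List.range (m - lo - 1)).map (fun d => g (lo + 1 + d))) ++ [g m])
              ++ (List.range (hi - m - 1)).map (fun d => g (m + 1 + d)) := by
          have hk1 : k - 1 = (m - lo) + (hi - m - 1) := by omega
          rw [hk1, List.range_add, List.map_append, List.map_map]
          congr 1
          · -- range (m - lo) = range (m - lo - 1) ++ [m - lo - 1]
            have h2 : m - lo = (m - lo - 1) + 1 := by omega
            rw [h2, List.range_succ, List.map_append]
            congr 1
            simp only [List.map_cons, List.map_nil]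
            congr 2
            omega
          · refine List.map_congr_left (fun d _ => ?_)
            simp only [Function.comp_apply]
            congr 1
            omega
        rw [hsplit, List.foldl_append, List.foldl_append]
        simp only [List.foldl_cons, List.foldl_nil]
  -- end solve_char

-- invariant of A's fused loop: running top-suffix, bottom-prefix and minimum
theorem A_loop (t b : List Int) (hb : t.length ≤ b.length + 1) :
    ∀ (k j : Nat) (m : Int), 1 ≤ j → j + k = t.length →
    ((PySem.List.pyRange (j:Int) (t.length:Int) 1).foldl
        (fun (s : Int × Int × Int) i =>
          let r0' := s.1 - PySem.List.pyGetD t i 0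
          let r1' := s.2.1 + PySem.List.pyGetD b (i - 1) 0
          (r0', r1', pvMin2 s.2.2 (pvMax2 r0' r1')))
        ((t.drop j).sum, (b.take (j-1)).sum, m)).2.2
      = ((List.range k).map
          (fun d => pvMax2 ((t.drop (j+d+1)).sum) ((b.take (j+d)).sum))).foldl pvMin2 m := by
  intro k
  induction k with
  | zero =>
      intro j m hj hjk
      rw [PySem.List.pyRange_one_eq_nil (by omega : (t.length:Int) ≤ (j:Int))]
      simp
  | succ k ih =>
      intro j m hj hjk
      rw [PySem.List.pyRange_one_cons (by omega : (j:Int) < (t.length:Int)), List.foldl_cons]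
      have hjt : j < t.length := by omega
      have hjb : j - 1 < b.length := by omega
      have e0 : (t.drop j).sum - PySem.List.pyGetD t (j:Int) 0 = (t.drop (j+1)).sum := by
        rw [PySem.List.pyGetD_natCast, List.getD_eq_getElem _ _ hjt,
          List.drop_eq_getElem_cons hjt, List.sum_cons]
        ring
      have e1 : (b.take (j-1)).sum + PySem.List.pyGetD b ((j:Int) - 1) 0 = (b.take j).sum := by
        have h := List.sum_take_succ b (j-1) hjb
        rw [show j - 1 + 1 = j from by omega] at h
        rw [show (j:Int) - 1 = ((j-1 : Nat) : Int) by omega, PySem.List.pyGetD_natCast,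
          List.getD_eq_getElem _ _ hjb, h]
      simp only [e0, e1]
      rw [show ((j:Int) + 1) = (((j+1 : Nat)) : Int) by omega] at *
      have := ih (j+1) (pvMin2 m (pvMax2 ((t.drop (j+1)).sum) ((b.take j).sum)))
        (by omega) (by omega)
      simp only [show j + 1 - 1 = j from by omega] at this
      rw [this, List.range_succ_eq_map, List.map_cons, List.foldl_cons, List.map_map]
      simp only [Nat.add_zero]
      congr 1
      refine List.map_congr_left (fun d _ => ?_)
      simp only [Function.comp_apply, Nat.succ_eq_add_one]
      rw [show j+(d+1)+1 = j+1+d+1 from by omega, show j+(d+1) = j+1+d from by omega]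

theorem A_eval (t : List Int) (rest : List (List Int)) (ht : t ≠ [])
    (hb : t.length ≤ (PySem.List.pyGetD (t :: rest) 1 []).length + 1) :
    gridGame (t :: rest)
      = ((List.range (t.length - 1)).map
          (fun d => pvMax2 ((t.drop (1+d+1)).sum)
            (((PySem.List.pyGetD (t :: rest) 1 []).take (1+d)).sum))).foldl pvMin2
          ((t.drop 1).sum) := by
  have hpos : 0 < t.length := by
    cases t
    · exact absurd rfl ht
    · simp
  have HL := A_loop t (PySem.List.pyGetD (t :: rest) 1 []) hb (t.length - 1) 1
    ((t.drop 1).sum) (by omega) (by omega : 1 + (t.length - 1) = t.length)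
  simp only [show (1:Nat) - 1 = 0 from rfl, List.take_zero, List.sum_nil, Nat.cast_one] at HL
  rcases t with _ | ⟨x, t'⟩
  · exact absurd rfl ht
  · unfold gridGame
    simp only [PySem.List.pyGetD_zero_cons]
    have hinit : (x :: t').sum - x = ((x :: t').drop 1).sum := by simp
    rw [hinit, HL]

-- ===== VERDICT (by name: the statement is the Claim_ definition above) =====
theorem gridGame_spec : Claim_equal_gridGame := by
  intro grid _ hpre
  unfold Spec_gridGame
  rcases grid with _ | ⟨t, rest⟩
  · exact absurd rfl hpre.1
  · have ht : t ≠ [] := by simpa using hpre.2.1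
    have hpos : 0 < t.length := List.length_pos_of_ne_nil ht
    set b := PySem.List.pyGetD (t :: rest) 1 [] with hbdef
    have hb : t.length ≤ b.length + 1 := by
      rcases le_or_gt 2 t.length with h2 | h2
      · have := (hpre.2.2 (by simpa using h2)).2
        simpa [hbdef, PySem.List.pyGetD_ofNat' (t :: rest) 1] using this
      · omega
    rw [A_eval t rest ht hb]
    unfold gridGame_alt
    simp only [PySem.List.pyGetD_zero_cons, ← hbdef]
    rw [PySem.List.slice_from _ (show (0:Int) ≤ 1 by norm_num)]
    rcases le_or_gt t.length 1 with h1 | h1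
    · -- single column: the loop is empty on both sides
      rw [if_pos (by exact_mod_cast h1)]
      have : t.length - 1 = 0 := by omega
      rw [this]
      simp
    · -- n ≥ 2
      rw [if_neg (by omega)]
      have hblen : 0 < b.length := by omega
      rw [show (1:Int) = ((1:Nat):Int) from rfl, solve_char t b (t.length - 1) 1 t.length 0
        (PySem.List.pyGetD b 0 0) (by omega) rfl]
      -- both sides are folds of min over the same candidates
      have gEq : ∀ j : Nat, 1 ≤ j →
          pvCand t b t.length 1 0 (PySem.List.pyGetD b 0 0) j
            = pvMax2 ((t.drop (j+1)).sum) ((b.take j).sum) := by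
        intro j hj
        unfold pvCand
        rw [pvMax2_eq_max]
        congr 1
        · -- top part: segment [j+1, n) of t is the suffix
          unfold segSum
          rw [List.take_of_length_le (by simp)]
          ring
        · -- bottom part: b[0] + segment [1, j) of b is the prefix of length j
          have : segSum b 0 j = PySem.List.pyGetD b 0 0 + segSum b 1 j := by
            rw [segSum_add b 0 1 j (by omega) hj]
            congr 1
            rcases b with _ | ⟨y, b'⟩
            · simp at hblen
            · simp [segSum, PySem.List.pyGetD_zero_cons]
          rw [← this]
          unfold segSum
          simp
      rw [gEq 1 (le_refl 1)]
      have mapEq : (List.range (t.length - 1 - 1)).map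
            (fun d => pvCand t b t.length 1 0 (PySem.List.pyGetD b 0 0) (1 + 1 + d))
          = (List.range (t.length - 1 - 1)).map
            (fun d => pvMax2 ((t.drop (1+(d+1)+1)).sum) ((b.take (1+(d+1))).sum)) := by
        refine List.map_congr_left (fun d _ => ?_)
        rw [show 1 + (d + 1) + 1 = 1 + 1 + d + 1 from by omega,
          show 1 + (d + 1) = 1 + 1 + d from by omega, gEq (1 + 1 + d) (by omega)]
      rw [mapEq]
      -- A: fold of pvMin2 = fold of min, prepend the initial candidate
      have hminfun : pvMin2 = fun a c : Int => min a c := by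
        funext a c; exact pvMin2_eq_min a c
      rw [hminfun, foldl_min_comm]
      have hsplitA : (List.range (t.length - 1)).map
            (fun d => pvMax2 ((t.drop (1+d+1)).sum) ((b.take (1+d)).sum))
          = pvMax2 ((t.drop 2).sum) ((b.take 1).sum)
            :: (List.range (t.length - 1 - 1)).map
              (fun d => pvMax2 ((t.drop (1+(d+1)+1)).sum) ((b.take (1+(d+1))).sum)) := by
        have : t.length - 1 = (t.length - 1 - 1) + 1 := by omega
        rw [this, List.range_succ_eq_map, List.map_cons, List.map_map]
        rfl
      rw [hsplitA, List.foldl_cons]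
      norm_num
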